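-- pv_equiv track=rewrite | github.com/kr2020lbh/Problem | Python/PROGRAMMERS/탐욕법/조이스틱.py | f
-- ===== SOURCE A (Python) =====
-- def f(start,name):
--     counts = []
--     for i in range(len(name)):
--         cnt = 0
--         if name[i] != 'A':
--             right = abs(i-start)
--             left = len(name)-right
--             cnt += min(right,left)
--             counts.append([cnt,i])
--     if len(counts)==0:
--         return None
--     return sorted(counts,key=lambda x:x[0])[0]
-- ===== SOURCE B (Python) =====
-- def f(start, name):
--     n = len(name)
--     best = None  # (cost, index), first index kept on ties
--     for i, ch in enumerate(name):
--         if ch != 'A':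
--             c = min(abs(i - start), n - abs(i - start))
--             if best is None or c < best[0]:
--                 best = (c, i)
--     if best is None:
--         return None
--     return [best[0], best[1]]
-- ===== Notes on version B (the rewrite author's own statement) =====
-- stated objective: faster
-- what changed: B replaces A's build-a-list-then-stable-sort-and-take-head with a single linear pass that tracks the running minimum cost (keeping the first index on ties), so no intermediate list and no sort.
import Mathlib
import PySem

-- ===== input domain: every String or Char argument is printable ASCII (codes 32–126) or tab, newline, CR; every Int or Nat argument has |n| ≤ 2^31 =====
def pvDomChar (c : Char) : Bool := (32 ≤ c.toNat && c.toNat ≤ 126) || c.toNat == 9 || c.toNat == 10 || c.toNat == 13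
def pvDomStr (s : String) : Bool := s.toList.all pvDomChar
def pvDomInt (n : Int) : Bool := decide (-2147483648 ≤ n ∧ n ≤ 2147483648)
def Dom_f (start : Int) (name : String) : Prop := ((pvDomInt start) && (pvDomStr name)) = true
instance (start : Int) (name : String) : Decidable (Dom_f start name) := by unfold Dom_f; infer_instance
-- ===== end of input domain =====

-- B replaces A's build-list + stable sort + take-head with one linear pass tracking the
-- running minimum cost (first index on ties): O(n) instead of O(n log n).


-- ===== PORT A =====
def f (start : Int) (name : String) : Option (List Int) :=
  let cs := name.toList
  let counts : List (List Int) :=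
    (PySem.List.pyRange 0 (PySem.Str.len name) 1).foldl (fun counts i =>
      if PySem.List.pyGetD cs i ' ' ≠ 'A' then
        let right : Int := |i - start|
        let left : Int := PySem.Str.len name - right
        counts ++ [[0 + min right left, i]]
      else counts) []
  if counts.length = 0 then none
  else some (PySem.List.pyGetD (PySem.List.sorted counts (fun x => PySem.List.pyGetD x 0 0)) 0 [])

-- ===== PORT B =====
def f_alt (start : Int) (name : String) : Option (List Int) :=
  let n : Int := PySem.Str.len name
  let best : Option (Int × Int) :=
    (PySem.List.enumerate name.toList 0).foldl (fun best p =>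
      if p.2 ≠ 'A' then
        let c : Int := min (|p.1 - start|) (n - |p.1 - start|)
        match best with
        | none => some (c, p.1)
        | some b => if c < b.1 then some (c, p.1) else some b
      else best) none
  best.map (fun b => [b.1, b.2])

-- ===== PRECONDITION & SPEC =====
def Spec_f (start : Int) (name : String) (out : Option (List Int)) : Prop := out = f_alt start name
instance (start : Int) (name : String) (out : Option (List Int)) : Decidable (Spec_f start name out) := by unfold Spec_f; infer_instance

-- ===== CLAIM (what is proved, stated in full; the proofs are below) =====
def Claim_equal_f : Prop := ∀ (start : Int) (name : String), Dom_f start name → Spec_f start name (f start name)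

-- ===== LEMMAS AND PROOFS =====

-- the first-minimum step A's 'sorted(...)[0]' and B's running minimum both reduce to
def pvStep {α : Type} (k : α → Int) (best : Option α) (x : α) : Option α :=
  match best with
  | none => some x
  | some b => if k x < k b then some x else some b

theorem pvHead_insertBy_nil {α : Type} (before : α → α → Bool) (x : α) :
    (PySem.List.insertBy before x []).head? = some x := by
  simp [PySem.List.insertBy]

theorem pvHead_insertBy_cons {α : Type} (before : α → α → Bool) (x y : α) (t : List α) :
    (PySem.List.insertBy before x (y :: t)).head? = some (if before x y then x else y) := by
  by_cases h : before x y <;> simp [PySem.List.insertBy, h]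

theorem pvFoldl_insertBy_head {α : Type} (k : α → Int) :
    ∀ (l : List α) (acc : List α),
      (l.foldl (fun acc x => PySem.List.insertBy (fun a b => decide (k a < k b)) x acc) acc).head?
        = l.foldl (pvStep k) acc.head? := by
  intro l
  induction l with
  | nil => intro acc; rfl
  | cons x l ih =>
    intro acc
    have hstep : (PySem.List.insertBy (fun a b => decide (k a < k b)) x acc).head?
        = pvStep k acc.head? x := by
      cases acc with
      | nil => simp [pvHead_insertBy_nil, pvStep]
      | cons y t =>
        rw [pvHead_insertBy_cons]
        by_cases h : k x < k y <;> simp [pvStep, h]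
    simp only [List.foldl_cons, ih, hstep]

theorem pvHead_sorted {α : Type} (k : α → Int) (l : List α) :
    (PySem.List.sorted l k).head? = l.foldl (pvStep k) none := by
  rw [PySem.List.sorted_eq_foldl_insertBy]
  simpa using pvFoldl_insertBy_head k l []

theorem pvFoldl_step_some {α : Type} (k : α → Int) :
    ∀ (l : List α) (b : α), ∃ m, l.foldl (pvStep k) (some b) = some m := by
  intro l
  induction l with
  | nil => intro b; exact ⟨b, rfl⟩
  | cons x l ih =>
    intro b
    simp only [List.foldl_cons, pvStep]
    by_cases h : k x < k b <;> simp [h] <;> [exact ih x; exact ih b]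

-- A's index loop over range(len(name)) re-expressed as a loop over enumerate(name)
theorem pvFoldl_range_enumerate {β : Type} (cs0 : List Char) (d : Char) (F : β → Int → Char → β) :
    ∀ (cs : List Char) (j : Nat), cs = cs0.drop j → ∀ (init : β),
      (PySem.List.pyRange (j : Int) (cs0.length : Int)).foldl
          (fun acc i => F acc i (PySem.List.pyGetD cs0 i d)) init
        = (PySem.List.enumerate cs (j : Int)).foldl (fun acc p => F acc p.1 p.2) init := by
  intro cs
  induction cs with
  | nil =>
    intro j h init
    have hlen : cs0.length ≤ j := List.drop_eq_nil_iff.mp h.symm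
    rw [PySem.List.pyRange_one_eq_nil (by exact_mod_cast hlen)]
    simp [PySem.List.enumerate]
  | cons c t ih =>
    intro j h init
    have hlt : j < cs0.length := by
      by_contra hge
      rw [List.drop_eq_nil_iff.mpr (Nat.le_of_not_lt hge)] at h
      simp at h
    have h' : c :: t = cs0[j] :: cs0.drop (j + 1) := h.trans (List.drop_eq_getElem_cons hlt)
    have hc : c = cs0[j] := (List.cons.inj h').1
    have ht : t = cs0.drop (j + 1) := (List.cons.inj h').2
    rw [PySem.List.pyRange_one_cons (show (j : Int) < (cs0.length : Int) by exact_mod_cast hlt)]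
    rw [PySem.List.enumerate_cons]
    simp only [List.foldl_cons]
    have hget : PySem.List.pyGetD cs0 (j : Int) d = c := by
      rw [PySem.List.pyGetD_natCast, List.getD_eq_getElem cs0 d hlt, hc]
    rw [hget]
    have hcast : ((j : Int) + 1) = ((j + 1 : Nat) : Int) := by push_cast; ring
    rw [hcast]
    exact ih (j + 1) ht (F init (j : Int) c)

-- simultaneous invariant: A's appended counts list, folded with pvStep, tracks B's running best
theorem pvInv (cost : Int → Int) :
    ∀ (ps : List (Int × Char)) (acc : List (List Int)) (best : Option (Int × Int)),
      acc.foldl (pvStep (fun x => PySem.List.pyGetD x 0 0)) none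
          = Option.map (fun b : Int × Int => [b.1, b.2]) best →
      ((ps.foldl (fun acc p => if p.2 ≠ 'A' then acc ++ [[cost p.1, p.1]] else acc) acc).foldl
          (pvStep (fun x => PySem.List.pyGetD x 0 0)) none)
        = Option.map (fun b : Int × Int => [b.1, b.2])
            (ps.foldl (fun best p =>
              if p.2 ≠ 'A' then
                match best with
                | none => some (cost p.1, p.1)
                | some b => if cost p.1 < b.1 then some (cost p.1, p.1) else some b
              else best) best) := by
  intro ps
  induction ps with
  | nil => intro acc best h; exact h
  | cons p ps ih =>
    intro acc best h
    by_cases hp : p.2 = 'A'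
    · simp only [List.foldl_cons, hp, ne_eq, not_true_eq_false, if_false]
      exact ih acc best h
    · simp only [List.foldl_cons, hp, ne_eq, not_false_eq_true, if_true]
      apply ih
      rw [List.foldl_append, h]
      cases best with
      | none => simp [pvStep]
      | some b =>
        simp only [Option.map_some, List.foldl_cons, List.foldl_nil, pvStep,
          PySem.List.pyGetD_zero_cons]
        by_cases hc : cost p.1 < b.1 <;> simp [hc]

-- A's tail (empty check + sorted head) computes the same Option as B's mapped running best
theorem pvFinal {α : Type} (g : α → List Int) (k : List Int → Int) (E : List (List Int))
    (B : Option α) (hinv : E.foldl (pvStep k) none = Option.map g B) :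
    (if E.length = 0 then none
     else some (PySem.List.pyGetD (PySem.List.sorted E k) 0 [])) = Option.map g B := by
  cases E with
  | nil => simpa using hinv.symm
  | cons x t =>
    obtain ⟨m, hm⟩ := pvFoldl_step_some k t x
    have hfold : (x :: t).foldl (pvStep k) none = some m := by simpa [pvStep] using hm
    have hhead : (PySem.List.sorted (x :: t) k).head? = some m := by
      rw [pvHead_sorted]; exact hfold
    have hgetD : PySem.List.pyGetD (PySem.List.sorted (x :: t) k) 0 [] = m := by
      cases hs : PySem.List.sorted (x :: t) k with
      | nil => rw [hs] at hhead; simp at hhead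
      | cons y ys =>
        rw [hs] at hhead
        simp only [List.head?_cons, Option.some.injEq] at hhead
        rw [PySem.List.pyGetD_zero_cons, hhead]
    rw [← hinv, hfold]
    simp [hgetD]

theorem f_eq_f_alt (start : Int) (name : String) : f start name = f_alt start name := by
  have hrange :
      (PySem.List.pyRange 0 (PySem.Str.len name)).foldl (fun counts i =>
          if PySem.List.pyGetD name.toList i ' ' ≠ 'A' then
            counts ++ [[0 + min (|i - start|) (PySem.Str.len name - |i - start|), i]]
          else counts) ([] : List (List Int))
        = (PySem.List.enumerate name.toList 0).foldl (fun acc p =>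
            if p.2 ≠ 'A' then
              acc ++ [[min (|p.1 - start|) (PySem.Str.len name - |p.1 - start|), p.1]]
            else acc) [] := by
    have h := pvFoldl_range_enumerate name.toList ' '
      (fun (acc : List (List Int)) i c =>
        if c ≠ 'A' then
          acc ++ [[min (|i - start|) (PySem.Str.len name - |i - start|), i]]
        else acc)
      name.toList 0 (by simp) []
    simpa [zero_add] using h
  simp only [f, f_alt]
  rw [hrange]
  exact pvFinal (fun b : Int × Int => [b.1, b.2]) (fun x => PySem.List.pyGetD x 0 0) _ _
    (pvInv (fun i => min (|i - start|) (PySem.Str.len name - |i - start|))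
      (PySem.List.enumerate name.toList 0) [] none rfl)

-- ===== VERDICT (by name: the statement is the Claim_ definition above) =====
theorem f_spec : Claim_equal_f := by
  intro start name _
  unfold Spec_f
  exact f_eq_f_alt start name
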